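-- pv_equiv track=rewrite | github.com/miko7879/programming_problems | Hacker Rank Interview Preparation Kit/Dictionaries and Hashmaps/anagramSubstrings.py | sherlockAnagrams
-- ===== SOURCE A (Python) =====
-- from collections import defaultdict
--
-- def sherlockAnagrams(s):
--
--     seen = defaultdict(int)
--
--     anagrams = 0
--
--     for i in range(len(s)):
--         curr = [0]*26
--         for j in range(i, len(s)):
--             curr[ord(s[j]) - ord('a')] += 1
--             key = tuple(curr)
--             anagrams += seen[key]
--             seen[key] += 1
--
--     return anagrams
-- ===== SOURCE B (Python) =====
-- from collections import defaultdict
--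
-- def sherlockAnagrams(s):
--     # Prefix-count vectors: signature of s[i:i+L] is pref[i+L] - pref[i],
--     # computed by subtraction instead of an incremental running count;
--     # loops go length-major, then a combinatorial pass sums c*(c-1)//2.
--     n = len(s)
--     pref = [(0,)*26]
--     for ch in s:
--         v = list(pref[-1])
--         v[ord(ch) - ord('a')] += 1
--         pref.append(tuple(v))
--     counts = defaultdict(int)
--     for L in range(1, n + 1):
--         for i in range(n - L + 1):
--             counts[tuple(a - b for a, b in zip(pref[i + L], pref[i]))] += 1
--     return sum(c * (c - 1) // 2 for c in counts.values())
-- ===== Notes on version B (the rewrite author's own statement) =====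
-- stated objective: alternative
-- what changed: Replaces the incremental running count vector and the online in-loop pair accumulation with precomputed prefix-count vectors (each substring signature is the elementwise difference of two prefix vectors), length-major loop order, and a final combinatorial pass summing c*(c-1)//2 over the signature tallies.
import Mathlib
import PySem

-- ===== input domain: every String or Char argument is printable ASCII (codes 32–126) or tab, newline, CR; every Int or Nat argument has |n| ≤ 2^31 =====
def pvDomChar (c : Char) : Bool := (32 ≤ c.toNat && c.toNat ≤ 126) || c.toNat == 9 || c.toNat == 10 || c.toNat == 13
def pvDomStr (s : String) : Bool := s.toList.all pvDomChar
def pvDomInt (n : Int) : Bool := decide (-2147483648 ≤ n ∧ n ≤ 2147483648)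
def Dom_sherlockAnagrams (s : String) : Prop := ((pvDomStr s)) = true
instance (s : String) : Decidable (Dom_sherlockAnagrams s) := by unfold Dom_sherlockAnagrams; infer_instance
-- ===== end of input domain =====

-- B replaces A's incremental running count vector and online pair accumulation with
-- precomputed prefix-count vectors (signature of s[i:i+L] = pref[i+L] - pref[i]),
-- length-major loops, and a final combinatorial pass summing c*(c-1)//2 per tally.

-- ===== PORT A =====
-- curr[ord(s[j]) - ord('a')] += 1  (same statement in both Pythons; in-range under
-- Pre_, where Python's negative indices wrap — pySetD/pyGetD are exact there)
def pvStep (curr : List Int) (ch : Char) : List Int :=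
  let idx : Int := (ch.toNat : Int) - 97
  PySem.List.pySetD curr idx (PySem.List.pyGetD curr idx 0 + 1)

def sherlockAnagrams (s : String) : Int :=
  let cs := s.toList
  let n : Int := PySem.List.len cs
  let res :=
    (PySem.List.pyRange 0 n).foldl
      (fun (st : PySem.Dict (List Int) Int × Int) i =>
        let inner :=
          (PySem.List.pyRange i n).foldl
            (fun (t : List Int × PySem.Dict (List Int) Int × Int) j =>
              let curr := pvStep t.1 (PySem.List.pyGetD cs j ' ')
              (curr, t.2.1.modify curr 0 (· + 1), t.2.2 + t.2.1.getD curr 0))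
            (List.replicate 26 (0 : Int), st.1, st.2)
        (inner.2.1, inner.2.2))
      (PySem.Dict.empty, 0)
  res.2

-- ===== PORT B =====
def sherlockAnagrams_alt (s : String) : Int :=
  let cs := s.toList
  let n : Int := PySem.List.len cs
  let pref : List (List Int) :=
    cs.foldl (fun pref ch => pref ++ [pvStep (PySem.List.pyGetD pref (-1) []) ch])
      [List.replicate 26 (0 : Int)]
  let counts :=
    (PySem.List.pyRange 1 (n + 1)).foldl
      (fun (d : PySem.Dict (List Int) Int) L =>
        (PySem.List.pyRange 0 (n - L + 1)).foldl
          (fun d i =>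
            d.modify
              (List.zipWith (fun a b => a - b)
                (PySem.List.pyGetD pref (i + L) [])
                (PySem.List.pyGetD pref i [])) 0 (· + 1))
          d)
      PySem.Dict.empty
  counts.values.foldl (fun acc c => acc + PySem.Int.floordiv (c * (c - 1)) 2) 0

-- ===== PRECONDITION & SPEC =====
-- Pre_ excludes exactly the strings containing a character whose code is below 71 or
-- above 122: on those both Pythons raise IndexError (list index out of range).
def Pre_sherlockAnagrams (s : String) : Prop :=
  (s.toList.all fun c => 71 ≤ c.toNat && c.toNat ≤ 122) = true
instance (s : String) : Decidable (Pre_sherlockAnagrams s) := by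
  unfold Pre_sherlockAnagrams; infer_instance

def pvWitness_sherlockAnagrams : String := "abba"

def Spec_sherlockAnagrams (s : String) (out : Int) : Prop := out = sherlockAnagrams_alt s
instance (s : String) (out : Int) : Decidable (Spec_sherlockAnagrams s out) := by
  unfold Spec_sherlockAnagrams; infer_instance

-- ===== CLAIM (what is proved, stated in full; the proofs are below) =====
def Claim_equal_sherlockAnagrams : Prop :=
  ∀ (s : String), Dom_sherlockAnagrams s → Pre_sherlockAnagrams s →
    Spec_sherlockAnagrams s (sherlockAnagrams s)

-- ===== LEMMAS AND PROOFS =====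

def pvInit : List Int := List.replicate 26 0

-- the sequence of signatures produced by one of A's inner loops starting from `curr`
def pvKeySeq (curr : List Int) : List Char → List (List Int)
  | [] => []
  | ch :: t => pvStep curr ch :: pvKeySeq (pvStep curr ch) t

-- all signatures produced by A's double loop, in order
def pvAll (cs : List Char) : List (List Int) :=
  (PySem.List.pyRange 0 (cs.length : Int)).flatMap fun i => pvKeySeq pvInit (cs.drop i.toNat)

-- A's online accumulation over a key sequence
def pvOnl (st : PySem.Dict (List Int) Int × Int) (ks : List (List Int)) :
    PySem.Dict (List Int) Int × Int :=
  ks.foldl (fun p k => (p.1.modify k 0 (· + 1), p.2 + p.1.getD k 0)) st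

def pvC2 (c : Int) : Int := PySem.Int.floordiv (c * (c - 1)) 2

-- the grouped count B computes: Σ over distinct keys of C(multiplicity, 2)
def pvSum (K : List (List Int)) : Int :=
  ((PySem.Set.ofList K).map fun k => pvC2 (K.count k : Int)).sum

-- signature of the substring of length t+1 starting at i, and the k-th prefix vector
def pvSig (cs : List Char) (i t : ℕ) : List Int :=
  ((cs.drop i).take (t + 1)).foldl pvStep pvInit

def pvPref (cs : List Char) (k : ℕ) : List Int :=
  (cs.take k).foldl pvStep pvInit

-- key lists of the two programs, as flatMaps over nat ranges
def pvKA (cs : List Char) : List (List Int) :=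
  (List.range cs.length).flatMap fun i =>
    (List.range (cs.length - i)).map fun t => pvSig cs i t

def pvKB (cs : List Char) : List (List Int) :=
  (List.range cs.length).flatMap fun t =>
    (List.range (cs.length - t)).map fun i => pvSig cs i t

def pvPairsA (n : ℕ) : List (ℕ × ℕ) :=
  (List.range n).flatMap fun i => (List.range (n - i)).map fun t => (i, t)

def pvPairsB (n : ℕ) : List (ℕ × ℕ) :=
  (List.range n).flatMap fun t => (List.range (n - t)).map fun i => (i, t)

-- ---- A-side: the port equals the online accumulation over pvAll ----

lemma pvOnl_append (st : PySem.Dict (List Int) Int × Int) (k1 k2 : List (List Int)) :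
    pvOnl st (k1 ++ k2) = pvOnl (pvOnl st k1) k2 := by
  simp [pvOnl, List.foldl_append]

lemma pvInnerA (l : List Char) (curr : List Int) (se : PySem.Dict (List Int) Int) (an : Int) :
    (l.foldl (fun (t : List Int × PySem.Dict (List Int) Int × Int) ch =>
        (pvStep t.1 ch, t.2.1.modify (pvStep t.1 ch) 0 (· + 1),
          t.2.2 + t.2.1.getD (pvStep t.1 ch) 0)) (curr, se, an)).2 =
      pvOnl (se, an) (pvKeySeq curr l) := by
  induction l generalizing curr se an with
  | nil => simp [pvKeySeq, pvOnl]
  | cons ch t ih => simp [pvKeySeq, pvOnl, List.foldl_cons] at *; exact ih _ _ _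

lemma pvOuterA (cs : List Char) (L : List Int) (h : ∀ i ∈ L, 0 ≤ i)
    (st : PySem.Dict (List Int) Int × Int) :
    L.foldl (fun (st : PySem.Dict (List Int) Int × Int) i =>
        ((((PySem.List.pyRange i (cs.length : Int)).foldl
            (fun (t : List Int × PySem.Dict (List Int) Int × Int) j =>
              (pvStep t.1 (PySem.List.pyGetD cs j ' '),
                t.2.1.modify (pvStep t.1 (PySem.List.pyGetD cs j ' ')) 0 (· + 1),
                t.2.2 + t.2.1.getD (pvStep t.1 (PySem.List.pyGetD cs j ' ')) 0))
            (List.replicate 26 (0 : Int), st.1, st.2))).2.1,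
          (((PySem.List.pyRange i (cs.length : Int)).foldl
            (fun (t : List Int × PySem.Dict (List Int) Int × Int) j =>
              (pvStep t.1 (PySem.List.pyGetD cs j ' '),
                t.2.1.modify (pvStep t.1 (PySem.List.pyGetD cs j ' ')) 0 (· + 1),
                t.2.2 + t.2.1.getD (pvStep t.1 (PySem.List.pyGetD cs j ' ')) 0))
            (List.replicate 26 (0 : Int), st.1, st.2))).2.2)) st =
      pvOnl st (L.flatMap fun i => pvKeySeq pvInit (cs.drop i.toNat)) := by
  induction L generalizing st with
  | nil => simp [pvOnl]
  | cons i L ih =>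
    have hi : 0 ≤ i := h i (by simp)
    rw [List.foldl_cons, List.flatMap_cons, pvOnl_append, ih (fun j hj => h j (List.mem_cons_of_mem _ hj))]
    congr 1
    rw [PySem.List.foldl_pyRange_pyGetD' cs ' '
      (fun (t : List Int × PySem.Dict (List Int) Int × Int) ch =>
        (pvStep t.1 ch, t.2.1.modify (pvStep t.1 ch) 0 (· + 1),
          t.2.2 + t.2.1.getD (pvStep t.1 ch) 0))
      (List.replicate 26 (0 : Int), st.1, st.2) hi, pvInnerA]
    rfl

lemma pvPortA_eq (s : String) :
    sherlockAnagrams s = (pvOnl (PySem.Dict.empty, 0) (pvAll s.toList)).2 := by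
  simp only [sherlockAnagrams, PySem.List.len_eq]
  rw [pvOuterA s.toList _ (fun i hi => ((PySem.List.mem_pyRange_one).1 hi).1)]
  rfl

-- ---- the online total is the combinatorial sum Σ C(count, 2) ----

lemma pvOnl_fst (K : List (List Int)) (st : PySem.Dict (List Int) Int × Int) :
    (pvOnl st K).1 = K.foldl (fun d k => d.modify k 0 (· + 1)) st.1 := by
  induction K generalizing st with
  | nil => rfl
  | cons k K ih =>
    simpa [pvOnl, List.foldl_cons] using ih (st.1.modify k 0 (· + 1), st.2 + st.1.getD k 0)

lemma pvC2_succ (c : Int) : pvC2 (c + 1) = pvC2 c + c := by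
  simp only [pvC2]
  rw [PySem.Int.floordiv_eq_ediv_of_pos (by norm_num),
    PySem.Int.floordiv_eq_ediv_of_pos (by norm_num)]
  have h : (c + 1) * (c + 1 - 1) = c * (c - 1) + 2 * c := by ring
  rw [h]
  omega

lemma pvSum_update (l : List (List Int)) (x : List Int) (f g : List Int → Int)
    (hnd : l.Nodup) (hx : x ∈ l) (hfg : ∀ k ∈ l, k ≠ x → g k = f k) :
    (l.map g).sum = (l.map f).sum + (g x - f x) := by
  induction l with
  | nil => simp at hx
  | cons a l ih =>
    rcases List.mem_cons.1 hx with rfl | hx'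
    · have : ∀ k ∈ l, g k = f k := fun k hk =>
        hfg k (List.mem_cons_of_mem _ hk) (fun he => (List.nodup_cons.1 hnd).1 (he ▸ hk))
      simp [List.map_congr_left this]
      ring
    · have ha : g a = f a := hfg a (List.mem_cons_self ..)
        (fun he => (List.nodup_cons.1 hnd).1 (he ▸ hx'))
      simp only [List.map_cons, List.sum_cons, ha,
        ih (List.nodup_cons.1 hnd).2 hx' (fun k hk hne => hfg k (List.mem_cons_of_mem _ hk) hne)]
      ring

lemma pvSum_append (K : List (List Int)) (x : List Int) :
    pvSum (K ++ [x]) = pvSum K + (K.count x : Int) := by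
  have hof : PySem.Set.ofList (K ++ [x]) = PySem.Set.add (PySem.Set.ofList K) x := by
    simp [PySem.Set.ofList, List.foldl_append]
  have hcnt : ∀ k : List Int, (K ++ [x]).count k = K.count k + if x = k then 1 else 0 := by
    intro k
    simp [List.count_append, List.count_singleton, beq_iff_eq]
  by_cases hmem : x ∈ K
  · have hxof : x ∈ PySem.Set.ofList K := (PySem.Set.mem_ofList K x).2 hmem
    have hadd : PySem.Set.add (PySem.Set.ofList K) x = PySem.Set.ofList K := by
      simp [PySem.Set.add]
      exact hmem
    simp only [pvSum, hof, hadd]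
    rw [pvSum_update (PySem.Set.ofList K) x
      (fun k => pvC2 (K.count k : Int))
      (fun k => pvC2 ((K ++ [x]).count k : Int))
      (PySem.Set.nodup_ofList K) hxof
      (fun k _ hne => by
        show pvC2 (((K ++ [x]).count k : Nat) : Int) = pvC2 ((K.count k : Nat) : Int)
        rw [hcnt k, if_neg (fun he => hne he.symm), Nat.add_zero])]
    have hgx : pvC2 (((K ++ [x]).count x : Nat) : Int) = pvC2 ((K.count x : Int) + 1) := by
      rw [hcnt x]
      simp
    rw [hgx, pvC2_succ]
    ring
  · have hadd : PySem.Set.add (PySem.Set.ofList K) x = PySem.Set.ofList K ++ [x] := by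
      simp [PySem.Set.add]
      exact hmem
    have hc0 : K.count x = 0 := List.count_eq_zero.2 hmem
    simp only [pvSum, hof, hadd, List.map_append, List.sum_append, List.map_cons,
      List.map_nil, List.sum_cons, List.sum_nil]
    have hsame : ∀ k ∈ PySem.Set.ofList K,
        pvC2 ((K ++ [x]).count k : Int) = pvC2 (K.count k : Int) := by
      intro k hk
      have hkK : k ∈ K := (PySem.Set.mem_ofList K k).1 hk
      have : x ≠ k := fun he => hmem (he ▸ hkK)
      simp [hcnt k, this]
    rw [List.map_congr_left hsame]
    have h1 : pvC2 1 = 0 := by decide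
    simp [hcnt x, hc0, h1]

lemma pvMain (K : List (List Int)) :
    (pvOnl (PySem.Dict.empty, 0) K).2 = pvSum K := by
  induction K using List.reverseRecOn with
  | nil => simp [pvOnl, pvSum, PySem.Set.ofList]
  | append_singleton K x ih =>
    rw [pvOnl_append, pvSum_append]
    have hd : (pvOnl (PySem.Dict.empty, 0) K).1 =
        K.foldl (fun d k => d.modify k 0 (· + 1)) PySem.Dict.empty := pvOnl_fst K _
    simp only [pvOnl, List.foldl_cons, List.foldl_nil]
    rw [← pvOnl, ih]
    congr 1
    rw [hd, ← PySem.Dict.counter_eq_foldl, PySem.Dict.getD_counter]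

-- ---- pyGetD/pvStep characterized through the resolved index ----

lemma pvGetD_idx {α : Type} (xs : List α) (i : Int) (d : α) :
    PySem.List.pyGetD xs i d =
      match PySem.List.pyIdx? xs.length i with
      | some k => xs.getD k d
      | none => d := by
  simp only [PySem.List.pyGetD, PySem.List.pyGet?]
  cases h : PySem.List.pyIdx? xs.length i with
  | none => rfl
  | some k => simp [List.getD_eq_getElem?_getD]

lemma pvStep_char (v : List Int) (ch : Char) :
    pvStep v ch =
      match PySem.List.pyIdx? v.length ((ch.toNat : Int) - 97) with
      | some k => v.set k (v.getD k 0 + 1)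
      | none => v := by
  simp only [pvStep, PySem.List.pySetD, PySem.List.pySet?, pvGetD_idx]
  cases h : PySem.List.pyIdx? v.length ((ch.toNat : Int) - 97) <;> simp

lemma pvStep_length (v : List Int) (ch : Char) : (pvStep v ch).length = v.length := by
  simp [pvStep, PySem.List.length_pySetD]

lemma foldl_pvStep_length (l : List Char) : ∀ (v : List Int),
    (l.foldl pvStep v).length = v.length := by
  induction l with
  | nil => intro v; rfl
  | cons ch t ih => intro v; rw [List.foldl_cons, ih, pvStep_length]

-- ---- prefix vectors: fold from a shifted start = elementwise shift of the fold ----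

lemma pvZipAdd_getD (a : List Int) : ∀ (b : List Int) (k : ℕ), a.length = b.length →
    (List.zipWith (· + ·) a b).getD k 0 = a.getD k 0 + b.getD k 0 := by
  induction a with
  | nil =>
    intro b k h
    cases b with
    | nil => simp
    | cons y b => simp at h
  | cons x a ih =>
    intro b k h
    cases b with
    | nil => simp at h
    | cons y b =>
      cases k with
      | zero => simp
      | succ k => simpa using ih b k (by simpa using h)

lemma pvZipAdd_set (a : List Int) : ∀ (b : List Int) (k : ℕ) (w : Int),
    List.zipWith (· + ·) a (b.set k w) = (List.zipWith (· + ·) a b).set k (a.getD k 0 + w) := by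
  induction a with
  | nil => intro b k w; simp
  | cons x a ih =>
    intro b k w
    cases b with
    | nil => simp
    | cons y b =>
      cases k with
      | zero => simp
      | succ k => simp [ih b k w]

lemma pvStep_zip (a b : List Int) (ch : Char) (h : a.length = b.length) :
    pvStep (List.zipWith (· + ·) a b) ch = List.zipWith (· + ·) a (pvStep b ch) := by
  have hlen : (List.zipWith (· + ·) a b).length = b.length := by
    simp [List.length_zipWith, h]
  rw [pvStep_char, pvStep_char, hlen]
  cases hk : PySem.List.pyIdx? b.length ((ch.toNat : Int) - 97) with
  | none => rfl
  | some k =>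
    rw [pvZipAdd_set a b k]
    dsimp only
    rw [pvZipAdd_getD a b k h, add_assoc]

lemma pvFold_zip (l : List Char) : ∀ (a b : List Int), a.length = b.length →
    l.foldl pvStep (List.zipWith (· + ·) a b) = List.zipWith (· + ·) a (l.foldl pvStep b) := by
  induction l with
  | nil => intro a b h; rfl
  | cons ch t ih =>
    intro a b h
    simp only [List.foldl_cons]
    rw [pvStep_zip a b ch h, ih a (pvStep b ch) (by rw [pvStep_length]; exact h)]

lemma pvZip_add_zero (a : List Int) :
    List.zipWith (· + ·) a (List.replicate a.length 0) = a := by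
  induction a with
  | nil => rfl
  | cons x a ih => simp [List.replicate_succ, ih]

lemma pvZip_sub_add (a : List Int) : ∀ (b : List Int), a.length = b.length →
    List.zipWith (fun p q => p - q) (List.zipWith (· + ·) a b) a = b := by
  induction a with
  | nil =>
    intro b h
    cases b with
    | nil => rfl
    | cons y b => simp at h
  | cons x a ih =>
    intro b h
    cases b with
    | nil => simp at h
    | cons y b => simp [ih b (by simpa using h)]

lemma pvPref_length (cs : List Char) (k : ℕ) : (pvPref cs k).length = 26 := by
  simp [pvPref, foldl_pvStep_length, pvInit]

lemma pvSig_length (cs : List Char) (i t : ℕ) : (pvSig cs i t).length = 26 := by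
  simp [pvSig, foldl_pvStep_length, pvInit]

lemma pvKey_eq (cs : List Char) (i t : ℕ) :
    List.zipWith (fun p q => p - q) (pvPref cs (i + t + 1)) (pvPref cs i) = pvSig cs i t := by
  have h1 : pvPref cs (i + t + 1) = List.zipWith (· + ·) (pvPref cs i) (pvSig cs i t) := by
    have he : i + t + 1 = i + (t + 1) := by omega
    rw [pvPref, he, List.take_add, List.foldl_append]
    have hz : (cs.take i).foldl pvStep pvInit =
        List.zipWith (· + ·) (pvPref cs i) (List.replicate (pvPref cs i).length 0) := by
      rw [pvZip_add_zero]
      rfl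
    rw [hz, pvFold_zip _ _ _ (by rw [List.length_replicate])]
    have hrep : ((cs.drop i).take (t + 1)).foldl pvStep (List.replicate (pvPref cs i).length 0)
        = pvSig cs i t := by
      rw [pvPref_length]
      rfl
    rw [hrep]
  rw [h1, pvZip_sub_add (pvPref cs i) (pvSig cs i t) (by rw [pvPref_length, pvSig_length])]

-- ---- pvKeySeq as a map over positions; pvAll as pvKA ----

lemma pvKeySeq_eq (l : List Char) : ∀ (curr : List Int),
    pvKeySeq curr l = (List.range l.length).map fun t => (l.take (t + 1)).foldl pvStep curr := by
  induction l with
  | nil => intro curr; rfl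
  | cons ch tl ih =>
    intro curr
    simp only [pvKeySeq, ih (pvStep curr ch), List.length_cons, List.range_succ_eq_map,
      List.map_cons, List.map_map]
    refine congrArg₂ _ ?_ ?_
    · simp
    · refine List.map_congr_left fun t _ => ?_
      simp [Function.comp, Nat.succ_eq_add_one, List.take_succ_cons, List.foldl_cons]

lemma pvAll_eq (cs : List Char) : pvAll cs = pvKA cs := by
  rw [pvAll, PySem.List.pyRange_zero_natCast, List.flatMap_map]
  refine congrArg (List.flatMap · (List.range cs.length)) (funext fun i => ?_)
  rw [Int.toNat_natCast, pvKeySeq_eq, List.length_drop]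
  rfl

-- ---- B-side: pref list, counts dict, and the final sum ----

lemma pvGetD_neg_one {α : Type} (p : List α) (h : p ≠ []) (d : α) :
    PySem.List.pyGetD p (-1) d = p.getLast h := by
  have hn : 0 < p.length := List.length_pos_of_ne_nil h
  rw [pvGetD_idx]
  have hidx : PySem.List.pyIdx? p.length (-1) = some (p.length - 1) := by
    unfold PySem.List.pyIdx?
    rw [if_neg (by omega), if_pos (by omega)]
    norm_num
  rw [hidx, List.getLast_eq_getElem]
  dsimp only
  exact List.getD_eq_getElem p d (by omega)

lemma pvPref_build (l : List Char) : ∀ (p : List (List Int)) (h : p ≠ []),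
    l.foldl (fun pref ch => pref ++ [pvStep (PySem.List.pyGetD pref (-1) []) ch]) p =
      p ++ pvKeySeq (p.getLast h) l := by
  induction l with
  | nil => intro p h; simp [pvKeySeq]
  | cons ch tl ih =>
    intro p h
    rw [List.foldl_cons, pvGetD_neg_one p h, ih _ (by simp), List.getLast_concat]
    simp [pvKeySeq]

lemma pvPref_list (cs : List Char) :
    cs.foldl (fun pref ch => pref ++ [pvStep (PySem.List.pyGetD pref (-1) []) ch])
        [List.replicate 26 (0 : Int)] =
      (List.range (cs.length + 1)).map (pvPref cs) := by
  rw [pvPref_build cs [List.replicate 26 (0 : Int)] (by simp), List.getLast_singleton]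
  rw [pvKeySeq_eq, List.range_succ_eq_map, List.map_cons, List.map_map]
  refine congrArg₂ _ rfl (List.map_congr_left fun t _ => ?_)
  simp only [Function.comp, Nat.succ_eq_add_one]
  rfl

lemma pvPref_lookup (cs : List Char) (k : ℕ) (hk : k ≤ cs.length) :
    PySem.List.pyGetD ((List.range (cs.length + 1)).map (pvPref cs)) (↑k) [] = pvPref cs k := by
  rw [PySem.List.pyGetD_natCast, PySem.List.getD_map_range _ _ _ _ (by omega)]

lemma pvCounts_eq (cs : List Char) :
    (PySem.List.pyRange 1 ((cs.length : Int) + 1)).foldl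
      (fun (d : PySem.Dict (List Int) Int) L =>
        (PySem.List.pyRange 0 ((cs.length : Int) - L + 1)).foldl
          (fun d i =>
            d.modify
              (List.zipWith (fun a b => a - b)
                (PySem.List.pyGetD ((List.range (cs.length + 1)).map (pvPref cs)) (i + L) [])
                (PySem.List.pyGetD ((List.range (cs.length + 1)).map (pvPref cs)) i [])) 0
              (· + 1))
          d)
      PySem.Dict.empty = PySem.Dict.counter (pvKB cs) := by
  rw [PySem.Dict.counter_eq_foldl, pvKB, List.foldl_flatMap]
  rw [PySem.List.pyRange_one 1 ((cs.length : Int) + 1)]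
  have h1 : ((cs.length : Int) + 1 - 1).toNat = cs.length := by omega
  rw [h1, List.foldl_map]
  refine PySem.List.foldl_congr_mem _ _ _ _ fun d t ht => ?_
  have ht' : t < cs.length := List.mem_range.1 ht
  rw [List.foldl_map, PySem.List.pyRange_one 0 ((cs.length : Int) - (1 + (t : Int)) + 1)]
  have h2 : ((cs.length : Int) - (1 + (t : Int)) + 1 - 0).toNat = cs.length - t := by omega
  rw [h2, List.foldl_map]
  refine PySem.List.foldl_congr_mem _ _ _ _ fun d' k hk => ?_
  have hk' : k < cs.length - t := List.mem_range.1 hk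
  have e1 : (0 : Int) + (k : Int) = ((k : ℕ) : Int) := by omega
  have e2 : (0 : Int) + (k : Int) + (1 + (t : Int)) = ((k + t + 1 : ℕ) : Int) := by
    push_cast
    ring
  rw [e2, e1, pvPref_lookup cs (k + t + 1) (by omega), pvPref_lookup cs k (by omega),
    pvKey_eq]

lemma pvPortB_eq (s : String) : sherlockAnagrams_alt s = pvSum (pvKB s.toList) := by
  simp only [sherlockAnagrams_alt, PySem.List.len_eq]
  rw [pvPref_list, pvCounts_eq, PySem.List.foldl_add]
  simp only [PySem.Dict.values, PySem.Dict.items_counter, List.map_map]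
  simp [pvSum, pvC2, Function.comp_def]

-- ---- the two key lists are permutations of each other ----

lemma mem_pvPairsA (n : ℕ) (p : ℕ × ℕ) : p ∈ pvPairsA n ↔ p.1 + p.2 < n := by
  obtain ⟨i, t⟩ := p
  simp only [pvPairsA, List.mem_flatMap, List.mem_map, List.mem_range, Prod.mk.injEq]
  constructor
  · rintro ⟨a, ha, b, hb, rfl, rfl⟩
    omega
  · intro h
    exact ⟨i, by omega, t, by omega, rfl, rfl⟩

lemma mem_pvPairsB (n : ℕ) (p : ℕ × ℕ) : p ∈ pvPairsB n ↔ p.1 + p.2 < n := by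
  obtain ⟨i, t⟩ := p
  simp only [pvPairsB, List.mem_flatMap, List.mem_map, List.mem_range, Prod.mk.injEq]
  constructor
  · rintro ⟨a, ha, b, hb, rfl, rfl⟩
    omega
  · intro h
    exact ⟨t, by omega, i, by omega, rfl, rfl⟩

lemma nodup_pvPairsA (n : ℕ) : (pvPairsA n).Nodup := by
  rw [pvPairsA, List.nodup_flatMap]
  refine ⟨fun i _ => List.Nodup.map (fun a b h => by simpa using h) List.nodup_range, ?_⟩
  refine List.pairwise_lt_range.imp ?_
  intro a b hab x hxa hxb
  simp only [List.mem_map, List.mem_range] at hxa hxb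
  obtain ⟨t1, _, rfl⟩ := hxa
  obtain ⟨t2, _, h2⟩ := hxb
  have : b = a := congrArg Prod.fst h2
  omega

lemma nodup_pvPairsB (n : ℕ) : (pvPairsB n).Nodup := by
  rw [pvPairsB, List.nodup_flatMap]
  refine ⟨fun t _ => List.Nodup.map (fun a b h => by simpa using h) List.nodup_range, ?_⟩
  refine List.pairwise_lt_range.imp ?_
  intro a b hab x hxa hxb
  simp only [List.mem_map, List.mem_range] at hxa hxb
  obtain ⟨t1, _, rfl⟩ := hxa
  obtain ⟨t2, _, h2⟩ := hxb
  have : b = a := congrArg Prod.snd h2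
  omega

lemma pvPairs_perm (n : ℕ) : (pvPairsA n).Perm (pvPairsB n) :=
  (List.perm_ext_iff_of_nodup (nodup_pvPairsA n) (nodup_pvPairsB n)).2
    (fun p => by rw [mem_pvPairsA, mem_pvPairsB])

lemma pvKA_eq_map (cs : List Char) :
    pvKA cs = (pvPairsA cs.length).map fun p => pvSig cs p.1 p.2 := by
  simp [pvKA, pvPairsA, List.map_flatMap, List.map_map, Function.comp_def]

lemma pvKB_eq_map (cs : List Char) :
    pvKB cs = (pvPairsB cs.length).map fun p => pvSig cs p.1 p.2 := by
  simp [pvKB, pvPairsB, List.map_flatMap, List.map_map, Function.comp_def]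

lemma pvK_perm (cs : List Char) : (pvKA cs).Perm (pvKB cs) := by
  rw [pvKA_eq_map, pvKB_eq_map]
  exact (pvPairs_perm cs.length).map _

-- ---- pvSum is invariant under permutation of the key list ----

lemma pvSum_perm (K K' : List (List Int)) (h : K.Perm K') : pvSum K = pvSum K' := by
  have hof : (PySem.Set.ofList K).Perm (PySem.Set.ofList K') :=
    (List.perm_ext_iff_of_nodup (PySem.Set.nodup_ofList K) (PySem.Set.nodup_ofList K')).2
      (fun k => by rw [PySem.Set.mem_ofList, PySem.Set.mem_ofList]; exact h.mem_iff)
  have hmap : ((PySem.Set.ofList K).map fun k => pvC2 (K.count k : Int)).Perm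
      ((PySem.Set.ofList K').map fun k => pvC2 (K'.count k : Int)) := by
    have hp := hof.map fun k => pvC2 (K.count k : Int)
    have he : (PySem.Set.ofList K').map (fun k => pvC2 (K.count k : Int)) =
        (PySem.Set.ofList K').map fun k => pvC2 (K'.count k : Int) :=
      List.map_congr_left fun k _ => by rw [h.count_eq k]
    rwa [he] at hp
  exact hmap.sum_eq

-- ===== VERDICT =====
theorem sherlockAnagrams_spec : Claim_equal_sherlockAnagrams := by
  intro s _ _
  show sherlockAnagrams s = sherlockAnagrams_alt s
  rw [pvPortA_eq, pvMain, pvAll_eq, pvPortB_eq]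
  exact pvSum_perm _ _ (pvK_perm s.toList)
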